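-- pv_equiv track=rewrite | github.com/dipmandl/Marvellous_Python_GenAI | Assignments/Assignment_17/q4.py | sum_of_factors
-- ===== SOURCE A (Python) =====
-- def sum_of_factors(n):
--     factors = []
--     total = 0
--     for i in range(1, n + 1):
--         if n % i == 0:
--             factors.append(i)
--             total += i
--     return factors, total
-- ===== SOURCE B (Python) =====
-- def sum_of_factors(n):
--     small = []
--     large = []
--     i = 1
--     while i * i <= n:
--         if n % i == 0:
--             small.append(i)
--             if i != n // i:
--                 large.append(n // i)
--         i += 1
--     factors = small + large[::-1]
--     return factors, sum(factors)
-- ===== Notes on version B (the rewrite author's own statement) =====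
-- stated objective: faster
-- what changed: B scans only up to sqrt(n), collecting each divisor together with its cofactor n//i and stitching the two halves together, instead of A's trial division over all of 1..n.
import Mathlib
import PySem

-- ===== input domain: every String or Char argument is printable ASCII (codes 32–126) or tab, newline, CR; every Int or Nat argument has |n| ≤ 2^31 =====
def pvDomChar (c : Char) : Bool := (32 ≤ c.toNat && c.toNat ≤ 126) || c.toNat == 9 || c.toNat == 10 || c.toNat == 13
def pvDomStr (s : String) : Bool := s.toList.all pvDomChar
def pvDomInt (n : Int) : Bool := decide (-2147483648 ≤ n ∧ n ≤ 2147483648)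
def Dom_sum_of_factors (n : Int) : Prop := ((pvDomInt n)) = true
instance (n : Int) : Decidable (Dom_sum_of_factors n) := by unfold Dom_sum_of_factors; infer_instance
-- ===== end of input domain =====

-- B replaces A's full 1..n trial-division scan by a sqrt(n) scan collecting divisor/cofactor pairs (asymptotically faster).

-- ===== PORT A =====
def sum_of_factors (n : Int) : List Int × Int :=
  (PySem.List.pyRange 1 (n + 1) 1).foldl
    (fun st i => if PySem.Int.mod n i == 0 then (st.1 ++ [i], st.2 + i) else st)
    ([], 0)

-- ===== PORT B =====
-- while i * i <= n: collect i into small and (when distinct) n // i into large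
def pvLoopB (n i : Int) (small large : List Int) : List Int × List Int :=
  if h : i * i ≤ n then
    if PySem.Int.mod n i == 0 then
      pvLoopB n (i + 1) (small ++ [i])
        (if i != PySem.Int.floordiv n i then large ++ [PySem.Int.floordiv n i] else large)
    else
      pvLoopB n (i + 1) small large
  else (small, large)
termination_by (n + 1 - i).toNat
decreasing_by
  all_goals
    have hin : i ≤ n := by
      by_cases h1 : i ≤ 0
      · nlinarith [mul_self_nonneg i]
      · have h2 : 1 ≤ i := by omega
        nlinarith [h2]
    omega

def sum_of_factors_alt (n : Int) : List Int × Int :=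
  let p := pvLoopB n 1 [] []
  let factors := p.1 ++ p.2.reverse   -- large[::-1] is reverse (PySem.List.slice?_none_none_neg_one)
  (factors, factors.sum)

-- ===== PRECONDITION & SPEC =====
def Spec_sum_of_factors (n : Int) (out : List Int × Int) : Prop := out = sum_of_factors_alt n
instance (n : Int) (out : List Int × Int) : Decidable (Spec_sum_of_factors n out) := by unfold Spec_sum_of_factors; infer_instance

-- ===== CLAIM (what is proved, stated in full; the proofs are below) =====
def Claim_equal_sum_of_factors : Prop := ∀ (n : Int), Dom_sum_of_factors n → Spec_sum_of_factors n (sum_of_factors n)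

-- ===== LEMMAS AND PROOFS =====

-- A's divisor list: trial division over 1..n
def pvF (n : Int) : List Int :=
  (PySem.List.pyRange 1 (n + 1) 1).filter (fun i => PySem.Int.mod n i == 0)

lemma pvA_fold (n : Int) :
    ∀ (l : List Int) (fs : List Int) (t : Int),
      l.foldl (fun st i => if PySem.Int.mod n i == 0 then (st.1 ++ [i], st.2 + i) else st) (fs, t)
        = (fs ++ l.filter (fun i => PySem.Int.mod n i == 0),
           t + (l.filter (fun i => PySem.Int.mod n i == 0)).sum) := by
  intro l
  induction l with
  | nil => intro fs t; simp
  | cons x xs ih =>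
    intro fs t
    by_cases hx : (PySem.Int.mod n x == 0) = true
    · rw [List.foldl_cons, if_pos hx, ih]
      simp [hx, add_assoc]
    · rw [List.foldl_cons, if_neg hx, ih]
      simp [hx]

lemma pvA_eq (n : Int) : sum_of_factors n = (pvF n, (pvF n).sum) := by
  unfold sum_of_factors pvF
  rw [pvA_fold]
  simp

-- small divisors d ∈ [i, n] with d*d ≤ n, and their distinct cofactors
def pvSmall (n i : Int) : List Int :=
  (PySem.List.pyRange i (n + 1) 1).filter
    (fun d => decide (d * d ≤ n) && (PySem.Int.mod n d == 0))

def pvLarge (n i : Int) : List Int :=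
  ((pvSmall n i).filter (fun d => decide (d * d ≠ n))).map (fun d => PySem.Int.floordiv n d)

lemma pvSmall_nil (n i : Int) (h1 : 1 ≤ i) (h2 : n < i * i) : pvSmall n i = [] := by
  unfold pvSmall
  rw [List.filter_eq_nil_iff]
  intro d hd
  have hmem := (PySem.List.mem_pyRange_one).1 hd
  have : n < d * d := by nlinarith [hmem.1]
  simp [this.not_ge]

lemma pvSmall_cons (n i : Int) (h1 : 1 ≤ i) (h2 : i * i ≤ n) :
    pvSmall n i = (if (PySem.Int.mod n i == 0) then [i] else []) ++ pvSmall n (i + 1) := by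
  have hin : i ≤ n := by nlinarith
  unfold pvSmall
  rw [PySem.List.pyRange_one_cons (by omega)]
  by_cases hm : PySem.Int.mod n i == 0
  · simp [h2, hm]
  · simp [h2, hm]

lemma pvLarge_nil (n i : Int) (h1 : 1 ≤ i) (h2 : n < i * i) : pvLarge n i = [] := by
  simp [pvLarge, pvSmall_nil n i h1 h2]

-- for a divisor i ≥ 1 of n: i = n // i iff i * i = n
lemma pv_bridge (n i : Int) (h1 : 1 ≤ i) (hdvd : i ∣ n) :
    i = PySem.Int.floordiv n i ↔ i * i = n := by
  rw [PySem.Int.floordiv_eq_ediv_of_pos (by omega : (0:Int) < i)]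
  constructor
  · intro h
    calc i * i = n / i * i := by rw [← h]
      _ = n := Int.ediv_mul_cancel hdvd
  · intro h
    have h2 : n / i = i := by
      rw [← h]; exact Int.mul_ediv_cancel_left i (by omega)
    omega

lemma pvLarge_cons (n i : Int) (h1 : 1 ≤ i) (h2 : i * i ≤ n) (hdvd : i ∣ n) :
    pvLarge n i = (if i * i = n then [] else [PySem.Int.floordiv n i]) ++ pvLarge n (i + 1) := by
  have hm : (PySem.Int.mod n i == 0) = true := by
    simp [PySem.Int.mod_eq_zero_iff_dvd n i, hdvd]
  unfold pvLarge
  rw [pvSmall_cons n i h1 h2, hm]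
  by_cases hsq : i * i = n
  · simp [hsq]
  · simp [hsq]

lemma pvLoopB_char (n : Int) :
    ∀ (k : Nat) (i : Int) (s l : List Int), 1 ≤ i → (n + 1 - i).toNat ≤ k →
      pvLoopB n i s l = (s ++ pvSmall n i, l ++ pvLarge n i) := by
  intro k
  induction k with
  | zero =>
    intro i s l h1 hk
    have hgt : n < i * i := by nlinarith [(show n + 1 ≤ i by omega)]
    rw [pvLoopB, dif_neg (not_le.mpr hgt), pvSmall_nil n i h1 hgt, pvLarge_nil n i h1 hgt]
    simp
  | succ k ih =>
    intro i s l h1 hk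
    by_cases hg : i * i ≤ n
    · have hin : i ≤ n := by nlinarith
      have hk' : (n + 1 - (i + 1)).toNat ≤ k := by omega
      rw [pvLoopB, dif_pos hg, pvSmall_cons n i h1 hg]
      by_cases hm : (PySem.Int.mod n i == 0) = true
      · have hdvd : i ∣ n := (PySem.Int.mod_eq_zero_iff_dvd n i).1 (by simpa using hm)
        rw [if_pos hm, ih (i + 1) _ _ (by omega) hk', pvLarge_cons n i h1 hg hdvd]
        by_cases hsq : i * i = n
        · have heq : i = PySem.Int.floordiv n i := (pv_bridge n i h1 hdvd).2 hsq
          have : (i != PySem.Int.floordiv n i) = false := by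
            rw [← heq]; simp
          rw [this]
          simp [hm, hsq]
        · have : (i != PySem.Int.floordiv n i) = true := by
            rw [bne_iff_ne]
            intro h; exact hsq ((pv_bridge n i h1 hdvd).1 h)
          rw [this]
          simp [hm, hsq]
      · rw [if_neg hm, ih (i + 1) _ _ (by omega) hk']
        have hnd : ¬ i ∣ n := fun h => hm (by simp [PySem.Int.mod_eq_zero_iff_dvd n i, h])
        have hL : pvLarge n i = pvLarge n (i + 1) := by
          unfold pvLarge
          rw [pvSmall_cons n i h1 hg]
          simp [hm]
        rw [hL]
        simp [hm]
    · rw [pvLoopB, dif_neg hg, pvSmall_nil n i h1 (by omega), pvLarge_nil n i h1 (by omega)]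
      simp

lemma pvB_eq (n : Int) :
    sum_of_factors_alt n
      = (pvSmall n 1 ++ (pvLarge n 1).reverse, (pvSmall n 1 ++ (pvLarge n 1).reverse).sum) := by
  have := pvLoopB_char n (n + 1 - 1).toNat 1 [] [] le_rfl le_rfl
  simp [sum_of_factors_alt, this]

-- main list equality
lemma mem_pvSmall (n x : Int) : x ∈ pvSmall n 1 ↔ 1 ≤ x ∧ x * x ≤ n ∧ x ∣ n := by
  unfold pvSmall
  simp only [List.mem_filter, PySem.List.mem_pyRange_one, Bool.and_eq_true, decide_eq_true_eq,
    beq_iff_eq, PySem.Int.mod_eq_zero_iff_dvd]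
  constructor
  · rintro ⟨⟨hx1, _⟩, hxx, hdvd⟩; exact ⟨hx1, hxx, hdvd⟩
  · rintro ⟨hx1, hxx, hdvd⟩; exact ⟨⟨hx1, by nlinarith⟩, hxx, hdvd⟩

lemma mem_pvLarge (n x : Int) (hn : 1 ≤ n) : x ∈ pvLarge n 1 ↔ 1 ≤ x ∧ n < x * x ∧ x ∣ n := by
  unfold pvLarge
  simp only [List.mem_map, List.mem_filter, decide_eq_true_eq, mem_pvSmall]
  constructor
  · rintro ⟨d, ⟨⟨hd1, hdd, hdvd⟩, hne⟩, rfl⟩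
    obtain ⟨q, hq⟩ := hdvd
    have hd0 : (0:Int) < d := by omega
    have hfq : PySem.Int.floordiv n d = q := by
      rw [PySem.Int.floordiv_eq_ediv_of_pos hd0, hq, Int.mul_ediv_cancel_left q (by omega)]
    have hq1 : 1 ≤ q := by
      by_contra h
      have hq0 : q ≤ 0 := by omega
      nlinarith
    have hdq : d < q := by
      by_contra h
      have hqd : q ≤ d := by omega
      have h1 : n ≤ d * d := by nlinarith
      exact hne (le_antisymm hdd h1)
    rw [hfq]
    exact ⟨by omega, by nlinarith, ⟨d, by linarith⟩⟩
  · rintro ⟨hx1, hxx, hdvd⟩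
    obtain ⟨d, hd⟩ := hdvd
    have hx0 : (0:Int) < x := by omega
    have hd1 : 1 ≤ d := by
      by_contra h
      have hd0 : d ≤ 0 := by omega
      nlinarith
    have hdx : d < x := by
      by_contra h
      have hxd : x ≤ d := by omega
      nlinarith
    refine ⟨d, ⟨⟨hd1, by nlinarith, ⟨x, by linarith⟩⟩, by intro hEq; nlinarith⟩, ?_⟩
    rw [PySem.Int.floordiv_eq_ediv_of_pos (by omega : (0:Int) < d), hd,
        show x * d = d * x by ring, Int.mul_ediv_cancel_left x (by omega)]

lemma mem_pvF (n x : Int) : x ∈ pvF n ↔ 1 ≤ x ∧ x ≤ n ∧ x ∣ n := by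
  unfold pvF
  simp only [List.mem_filter, PySem.List.mem_pyRange_one, beq_iff_eq,
    PySem.Int.mod_eq_zero_iff_dvd]
  constructor
  · rintro ⟨⟨h1, h2⟩, h3⟩; exact ⟨h1, by omega, h3⟩
  · rintro ⟨h1, h2, h3⟩; exact ⟨⟨h1, by omega⟩, h3⟩

lemma pairwise_pvSmall (n : Int) : (pvSmall n 1).Pairwise (· < ·) :=
  List.Pairwise.sublist List.filter_sublist (PySem.List.pairwise_lt_pyRange_one 1 (n + 1))

lemma pairwise_pvB (n : Int) (hn : 1 ≤ n) :
    (pvSmall n 1 ++ (pvLarge n 1).reverse).Pairwise (· < ·) := by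
  rw [List.pairwise_append]
  refine ⟨pairwise_pvSmall n, ?_, ?_⟩
  · rw [List.pairwise_reverse]
    unfold pvLarge
    rw [List.pairwise_map]
    refine List.Pairwise.imp_of_mem ?_
      (List.Pairwise.sublist List.filter_sublist (pairwise_pvSmall n))
    intro a b ha hb hab
    have ha' := (mem_pvSmall n a).1 (List.mem_of_mem_filter ha)
    have hb' := (mem_pvSmall n b).1 (List.mem_of_mem_filter hb)
    obtain ⟨ha1, haa, hadvd⟩ := ha'
    obtain ⟨hb1, hbb, hbdvd⟩ := hb'
    have hqa : n / a * a = n := Int.ediv_mul_cancel hadvd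
    have hqb : n / b * b = n := Int.ediv_mul_cancel hbdvd
    rw [PySem.Int.floordiv_eq_ediv_of_pos (by omega : (0:Int) < a),
        PySem.Int.floordiv_eq_ediv_of_pos (by omega : (0:Int) < b)]
    have hn1 : 1 ≤ n := by nlinarith
    have hqa1 : 1 ≤ n / a := by
      by_contra h
      have h0 : n / a ≤ 0 := by omega
      nlinarith
    have hqb1 : 1 ≤ n / b := by
      by_contra h
      have h0 : n / b ≤ 0 := by omega
      nlinarith
    show n / b < n / a
    by_contra h
    have h0 : n / a ≤ n / b := by omega
    nlinarith
  · intro a ha b hb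
    have ha' := (mem_pvSmall n a).1 ha
    rw [List.mem_reverse] at hb
    have hb' := (mem_pvLarge n b hn).1 hb
    nlinarith [ha'.1, ha'.2.1, hb'.1, hb'.2.1]

lemma pv_lists_eq (n : Int) (hn : 1 ≤ n) :
    pvF n = pvSmall n 1 ++ (pvLarge n 1).reverse := by
  have hmem : ∀ x, x ∈ pvF n ↔ x ∈ pvSmall n 1 ++ (pvLarge n 1).reverse := by
    intro x
    rw [mem_pvF, List.mem_append, List.mem_reverse, mem_pvSmall, mem_pvLarge n x hn]
    constructor
    · rintro ⟨hx1, hxn, hdvd⟩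
      by_cases hxx : x * x ≤ n
      · exact Or.inl ⟨hx1, hxx, hdvd⟩
      · exact Or.inr ⟨hx1, by omega, hdvd⟩
    · rintro (⟨hx1, hxx, hdvd⟩ | ⟨hx1, hxx, hdvd⟩)
      · exact ⟨hx1, by nlinarith, hdvd⟩
      · exact ⟨hx1, Int.le_of_dvd (by omega) hdvd, hdvd⟩
  have s1 : (pvF n).Pairwise (· < ·) :=
    List.Pairwise.sublist List.filter_sublist (PySem.List.pairwise_lt_pyRange_one 1 (n + 1))
  have s2 := pairwise_pvB n hn
  have nd1 : (pvF n).Nodup := List.Pairwise.imp (fun h => ne_of_lt h) s1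
  have nd2 : (pvSmall n 1 ++ (pvLarge n 1).reverse).Nodup :=
    List.Pairwise.imp (fun h => ne_of_lt h) s2
  exact ((List.perm_ext_iff_of_nodup nd1 nd2).mpr hmem).eq_of_pairwise
    (le := (· < ·)) (fun _ _ _ _ hab hba => absurd hab (asymm hba)) s1 s2

-- ===== VERDICT (by name: the statement is the Claim_ definition above) =====
theorem sum_of_factors_spec : Claim_equal_sum_of_factors := by
  intro n _
  unfold Spec_sum_of_factors
  by_cases hn' : 1 ≤ n
  case neg =>
    have hn : n ≤ 0 := by omega
    have h1 : PySem.List.pyRange 1 (n + 1) 1 = [] := PySem.List.pyRange_one_eq_nil (by omega)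
    have h2 : pvLoopB n 1 [] [] = ([], []) := by
      rw [pvLoopB, dif_neg (by omega : ¬ ((1:Int) * 1 ≤ n))]
    simp [sum_of_factors, sum_of_factors_alt, h1, h2]
  case pos =>
    rw [pvA_eq, pvB_eq n, pv_lists_eq n hn']
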